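-- pv_equiv track=rewrite | github.com/bradgwest/dcp | dcp/problems/book/9/9_3.py | regular_numbers
-- ===== SOURCE A (Python) =====
-- def regular_numbers(n):
--     twos = [2**i for i in range(n)]
--     threes = [3**i for i in range(n)]
--     fives = [5**i for i in range(n)]
--
--     solutions = set()
--     for i in twos:
--         for j in threes:
--             for k in fives:
--                 solutions.add(i * j * k)
--
--     return sorted(solutions)
-- ===== SOURCE B (Python) =====
-- def regular_numbers(n):
--     if n <= 0:
--         return []
--
--     def merge(a, b):
--         out = []
--         i = j = 0
--         while i < len(a) and j < len(b):
--             if a[i] <= b[j]: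
--                 out.append(a[i])
--                 i += 1
--             else:
--                 out.append(b[j])
--                 j += 1
--         out.extend(a[i:])
--         out.extend(b[j:])
--         return out
--
--     result = [1]
--     for p in (2, 3, 5):
--         layers = []
--         layer = result
--         for _ in range(n):
--             layers.append(layer)
--             layer = [v * p for v in layer]
--         while len(layers) > 1:
--             merged = []
--             i = 0
--             while i + 1 < len(layers):
--                 merged.append(merge(layers[i], layers[i + 1]))
--                 i += 2
--             if i < len(layers):
--                 merged.append(layers[i])
--             layers = merged
--         result = layers[0]
--     return result
-- ===== Notes on version B (the rewrite author's own statement) =====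
-- stated objective: alternative
-- what changed: Instead of materializing the full n^3 Cartesian product into a set and sorting it, B builds the sorted result incrementally: starting from [1], for each prime p it repeatedly multiplies the previous layer by p and merges the sorted layers, so no set and no final sort are needed.
import Mathlib
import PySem

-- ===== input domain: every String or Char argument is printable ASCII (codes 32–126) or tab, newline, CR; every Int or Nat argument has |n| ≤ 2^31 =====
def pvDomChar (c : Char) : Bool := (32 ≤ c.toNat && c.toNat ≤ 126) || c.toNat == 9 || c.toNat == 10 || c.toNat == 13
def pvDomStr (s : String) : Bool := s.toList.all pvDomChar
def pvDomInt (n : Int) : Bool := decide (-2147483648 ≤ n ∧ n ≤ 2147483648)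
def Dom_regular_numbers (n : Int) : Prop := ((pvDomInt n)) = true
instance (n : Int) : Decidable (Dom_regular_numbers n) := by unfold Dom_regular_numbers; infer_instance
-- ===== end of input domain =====

-- B replaces A's "materialize all n^3 products into a set, then sort" by an incremental
-- build: starting from [1], for each prime it pairwise-merges the p-scaled sorted layers,
-- so no set and no final sort are needed (objective: alternative algorithm, similar cost).

-- ===== PORT A =====
-- 2**i is exact as (2:ℤ)^i.toNat here: range(n) only yields i ≥ 0
def regular_numbers (n : Int) : List Int :=
  let twos := (PySem.List.pyRange 0 n 1).map (fun i => (2:Int) ^ i.toNat)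
  let threes := (PySem.List.pyRange 0 n 1).map (fun i => (3:Int) ^ i.toNat)
  let fives := (PySem.List.pyRange 0 n 1).map (fun i => (5:Int) ^ i.toNat)
  let solutions : PySem.Set Int :=
    twos.foldl (fun s i =>
      threes.foldl (fun s j =>
        fives.foldl (fun s k => PySem.Set.add s (i * j * k)) s) s)
      PySem.Set.empty
  PySem.List.sorted solutions (fun x => x) false

-- ===== PORT B =====
-- Source B's hand-written two-pointer merge of two lists, as the obvious structural recursion
def pvMerge : List Int → List Int → List Int
  | [], b => b
  | a, [] => a
  | x :: a, y :: b => if x ≤ y then x :: pvMerge a (y :: b) else y :: pvMerge (x :: a) b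

-- the inner 'while i + 1 < len(layers)' pairing pass, as the obvious recursion on layers
def pvMergePairs : List (List Int) → List (List Int)
  | a :: b :: rest => pvMerge a b :: pvMergePairs rest
  | ls => ls

theorem length_pvMergePairs : ∀ ls : List (List Int),
    (pvMergePairs ls).length = (ls.length + 1) / 2 := by
  intro ls
  fun_induction pvMergePairs ls with
  | case1 a b rest ih => simp only [List.length_cons, ih]; omega
  | case2 ls h =>
      cases ls with
      | nil => rfl
      | cons a tl =>
          cases tl with
          | nil => simp
          | cons b rest => exact absurd rfl (h a b rest)

-- Source B's 'while len(layers) > 1' reduction; python never reaches it with layers == []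
def pvMergeAll : List (List Int) → List Int
  | [] => []
  | [l] => l
  | a :: b :: rest => pvMergeAll (pvMergePairs (a :: b :: rest))
  termination_by ls => ls.length
  decreasing_by simp only [length_pvMergePairs]; simp only [List.length_cons]; omega

def regular_numbers_alt (n : Int) : List Int :=
  if n ≤ 0 then []
  else
    [(2:Int), 3, 5].foldl
      (fun result p =>
        pvMergeAll
          (((PySem.List.pyRange 0 n 1).foldl
            (fun (st : List (List Int) × List Int) _ =>
              (st.1 ++ [st.2], st.2.map (fun v => v * p)))
            ([], result)).1))
      [1]

-- ===== PRECONDITION & SPEC =====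
def Spec_regular_numbers (n : Int) (out : List Int) : Prop := out = regular_numbers_alt n
instance (n : Int) (out : List Int) : Decidable (Spec_regular_numbers n out) := by unfold Spec_regular_numbers; infer_instance

-- ===== CLAIM (what is proved, stated in full; the proofs are below) =====
def Claim_equal_regular_numbers : Prop := ∀ (n : Int), Dom_regular_numbers n → Spec_regular_numbers n (regular_numbers n)

-- ===== LEMMAS AND PROOFS =====

theorem pv_lt_of_le_nodup (l : List Int) (h : l.Pairwise (· ≤ ·)) (h2 : l.Nodup) :
    l.Pairwise (· < ·) := by
  induction l with
  | nil => exact List.Pairwise.nil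
  | cons x t ih =>
      rcases List.pairwise_cons.1 h with ⟨hx, ht⟩
      rcases List.nodup_cons.1 h2 with ⟨hnx, hnt⟩
      exact List.pairwise_cons.2
        ⟨fun y hy => lt_of_le_of_ne (hx y hy) (fun e => hnx (e ▸ hy)), ih ht hnt⟩

theorem pvMerge_perm (a b : List Int) : (pvMerge a b).Perm (a ++ b) := by
  fun_induction pvMerge a b with
  | case1 b => simp
  | case2 x a => simp
  | case3 x a y b h ih => simpa [pvMerge, h] using ih.cons x
  | case4 x a y b h ih => simpa [pvMerge, h] using (ih.cons y).trans List.perm_middle.symm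

theorem mem_pvMerge (a b : List Int) (x : Int) : x ∈ pvMerge a b ↔ x ∈ a ∨ x ∈ b := by
  rw [(pvMerge_perm a b).mem_iff, List.mem_append]

theorem pvMerge_sorted (a b : List Int) (ha : a.Pairwise (· ≤ ·)) (hb : b.Pairwise (· ≤ ·)) :
    (pvMerge a b).Pairwise (· ≤ ·) := by
  fun_induction pvMerge a b with
  | case1 b => exact hb
  | case2 x a => exact ha
  | case3 x a y b h ih =>
      rcases List.pairwise_cons.1 ha with ⟨hxa, ha'⟩
      refine List.pairwise_cons.2 ⟨?_, ih ha' hb⟩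
      intro z hz
      rcases (mem_pvMerge _ _ _).1 hz with hz | hz
      · exact hxa z hz
      · rcases List.mem_cons.1 hz with rfl | hz
        · exact h
        · exact le_trans h ((List.pairwise_cons.1 hb).1 z hz)
  | case4 x a y b h ih =>
      rcases List.pairwise_cons.1 hb with ⟨hyb, hb'⟩
      refine List.pairwise_cons.2 ⟨?_, ih ha hb'⟩
      intro z hz
      have hyx : y ≤ x := le_of_not_ge h
      rcases (mem_pvMerge _ _ _).1 hz with hz | hz
      · rcases List.mem_cons.1 hz with rfl | hz
        · exact hyx
        · exact le_trans hyx ((List.pairwise_cons.1 ha).1 z hz)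
      · exact hyb z hz

theorem pv_mem_foldl {α : Type} (Q : α → Int → Prop)
    (f : PySem.Set Int → α → PySem.Set Int)
    (hf : ∀ s a x, x ∈ f s a ↔ x ∈ s ∨ Q a x) :
    ∀ (l : List α) (s : PySem.Set Int) (x : Int),
      x ∈ l.foldl f s ↔ x ∈ s ∨ ∃ a ∈ l, Q a x := by
  intro l
  induction l with
  | nil => simp
  | cons a t ih =>
      intro s x
      simp only [List.foldl_cons, ih, hf, List.mem_cons]
      constructor
      · rintro ((h | h) | ⟨b, hb, h⟩)
        · exact Or.inl h
        · exact Or.inr ⟨a, Or.inl rfl, h⟩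
        · exact Or.inr ⟨b, Or.inr hb, h⟩
      · rintro (h | ⟨b, (rfl | hb), h⟩)
        · exact Or.inl (Or.inl h)
        · exact Or.inl (Or.inr h)
        · exact Or.inr ⟨b, hb, h⟩

theorem pv_nodup_foldl {α : Type} (f : PySem.Set Int → α → PySem.Set Int)
    (hf : ∀ s a, s.Nodup → (f s a).Nodup) :
    ∀ (l : List α) (s : PySem.Set Int), s.Nodup → (l.foldl f s).Nodup := by
  intro l
  induction l with
  | nil => intro s hs; exact hs
  | cons a t ih => intro s hs; exact ih _ (hf s a hs)

-- unique p-adic valuation: if p ∤ v, p ∤ w then v·pᵉ = w·p^f forces e = f and v = w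
theorem pv_pow_cancel (p v w : Int) (hp : 1 < p) (hnv : ¬ p ∣ v) (hnw : ¬ p ∣ w) :
    ∀ (e f : ℕ), v * p ^ e = w * p ^ f → e = f ∧ v = w := by
  have hp0 : p ≠ 0 := by intro h; rw [h] at hp; omega
  intro e
  induction e with
  | zero =>
      intro f h
      cases f with
      | zero => simpa using h
      | succ g =>
          exfalso
          exact hnv ⟨w * p ^ g, by rw [pow_zero, mul_one] at h; rw [h, pow_succ]; ring⟩
  | succ e ih =>
      intro f h
      cases f with
      | zero =>
          exfalso
          exact hnw ⟨v * p ^ e, by rw [pow_zero, mul_one] at h; rw [← h, pow_succ]; ring⟩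
      | succ g =>
          have h' : v * p ^ e * p = w * p ^ g * p := by
            rw [pow_succ, pow_succ] at h; linarith [h]
          rcases ih g (mul_right_cancel₀ hp0 h') with ⟨he, hv⟩
          exact ⟨by omega, hv⟩

theorem pvMergePairs_flatten_perm : ∀ ls : List (List Int),
    (pvMergePairs ls).flatten.Perm ls.flatten := by
  intro ls
  fun_induction pvMergePairs ls with
  | case1 a b rest ih =>
      simp only [List.flatten_cons]
      exact ((pvMerge_perm a b).append ih).trans (by rw [List.append_assoc])
  | case2 ls h => exact List.Perm.refl _

theorem pvMergePairs_sorted : ∀ ls : List (List Int),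
    (∀ l ∈ ls, l.Pairwise (· ≤ ·)) → ∀ l ∈ pvMergePairs ls, l.Pairwise (· ≤ ·) := by
  intro ls
  fun_induction pvMergePairs ls with
  | case1 a b rest ih =>
      intro h l hl
      rcases List.mem_cons.1 hl with rfl | hl
      · exact pvMerge_sorted _ _ (h a (by simp)) (h b (by simp))
      · exact ih (fun l hl => h l (by simp [hl])) l hl
  | case2 ls h => exact fun h l hl => h l hl

theorem pvMergeAll_perm : ∀ ls : List (List Int), (pvMergeAll ls).Perm ls.flatten := by
  intro ls
  fun_induction pvMergeAll ls with
  | case1 => exact List.Perm.refl _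
  | case2 l => simp
  | case3 a b rest ih => exact ih.trans (pvMergePairs_flatten_perm _)

theorem pvMergeAll_sorted : ∀ ls : List (List Int),
    (∀ l ∈ ls, l.Pairwise (· ≤ ·)) → (pvMergeAll ls).Pairwise (· ≤ ·) := by
  intro ls
  fun_induction pvMergeAll ls with
  | case1 => exact fun _ => List.Pairwise.nil
  | case2 l => exact fun h => h l (by simp)
  | case3 a b rest ih => exact fun h => ih (pvMergePairs_sorted _ h)

-- the layer-building loop produces exactly the scaled copies res·p⁰, …, res·p^(len-1)
theorem pv_layers (p : Int) (res : List Int) :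
    ∀ (l : List Int) (t : ℕ) (layers : List (List Int)),
      (l.foldl (fun (st : List (List Int) × List Int) _ =>
          (st.1 ++ [st.2], st.2.map (fun v => v * p)))
        (layers, res.map (fun v => v * p ^ t))).1
      = layers ++ (List.range l.length).map (fun e => res.map (fun v => v * p ^ (t + e))) := by
  intro l
  induction l with
  | nil => intro t layers; simp
  | cons hd tl ih =>
      intro t layers
      have hlayer' : (res.map (fun v => v * p ^ t)).map (fun v => v * p)
          = res.map (fun v => v * p ^ (t + 1)) := by
        rw [List.map_map]; simp only [Function.comp_def, pow_succ, ← mul_assoc]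
      have hfun : ∀ (a b : ℕ), a = b →
          res.map (fun v => v * p ^ a) = res.map (fun v => v * p ^ b) :=
        fun a b h => by rw [h]
      simp only [List.foldl_cons, hlayer', ih (t + 1), List.length_cons,
        List.range_succ_eq_map, List.map_cons, List.map_map, List.append_assoc,
        List.singleton_append, Nat.add_zero]
      congr 1
      congr 1
      exact List.map_congr_left (fun e _ => by
        simp only [Function.comp_apply]
        exact hfun _ _ (by omega))

-- one prime pass of B, as a named function of the base list
def pvStage (p n : Int) (res : List Int) : List Int :=
  pvMergeAll
    (((PySem.List.pyRange 0 n 1).foldl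
      (fun (st : List (List Int) × List Int) _ =>
        (st.1 ++ [st.2], st.2.map (fun v => v * p)))
      ([], res)).1)

-- one full prime pass, started from a strictly sorted p-free list
theorem pv_prime_step (p : Int) (hp : 1 < p) (n : Int) (_hn : ¬ n ≤ 0) (res : List Int)
    (hnd : ∀ x ∈ res, ¬ p ∣ x) (hsrt : res.Pairwise (· < ·)) :
    ((pvStage p n res).Pairwise (· < ·)) ∧
    (∀ x, x ∈ pvStage p n res ↔ ∃ e < n.toNat, ∃ v ∈ res, x = v * p ^ e) := by
  have hppos : (0:Int) < p := by omega
  have hres0 : res = res.map (fun v => v * p ^ 0) := by simp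
  have hlen : (PySem.List.pyRange 0 n 1).length = n.toNat := by
    rw [PySem.List.length_pyRange_one]; congr 1; omega
  have hL : pvStage p n res
      = pvMergeAll ((List.range n.toNat).map (fun e => res.map (fun v => v * p ^ e))) := by
    unfold pvStage
    conv_lhs => rw [hres0, pv_layers p res (PySem.List.pyRange 0 n 1) 0 []]
    rw [hlen]
    simp
  have hsrtL : ∀ l ∈ (List.range n.toNat).map (fun e => res.map (fun v => v * p ^ e)),
      l.Pairwise (· < ·) := by
    intro l hl
    rcases List.mem_map.1 hl with ⟨e, -, rfl⟩
    rw [List.pairwise_map]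
    exact hsrt.imp (fun hvw => mul_lt_mul_of_pos_right hvw (pow_pos hppos _))
  have hperm := pvMergeAll_perm ((List.range n.toNat).map (fun e => res.map (fun v => v * p ^ e)))
  have hmemL : ∀ x, x ∈ pvStage p n res ↔ ∃ e < n.toNat, ∃ v ∈ res, x = v * p ^ e := by
    intro x
    rw [hL, hperm.mem_iff, List.mem_flatten]
    constructor
    · rintro ⟨l, hl, hx⟩
      rcases List.mem_map.1 hl with ⟨e, he, rfl⟩
      rcases List.mem_map.1 hx with ⟨v, hv, rfl⟩
      exact ⟨e, List.mem_range.1 he, v, hv, rfl⟩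
    · rintro ⟨e, he, v, hv, rfl⟩
      exact ⟨res.map (fun v => v * p ^ e),
        List.mem_map.2 ⟨e, List.mem_range.2 he, rfl⟩, List.mem_map.2 ⟨v, hv, rfl⟩⟩
  have hndF : ((List.range n.toNat).map (fun e => res.map (fun v => v * p ^ e))).flatten.Nodup := by
    rw [List.nodup_flatten]
    constructor
    · intro l hl; exact (hsrtL l hl).imp ne_of_lt
    · rw [List.pairwise_map]
      refine List.pairwise_lt_range.imp ?_
      intro e f hef
      rw [List.disjoint_left]
      intro x hx hx'
      rcases List.mem_map.1 hx with ⟨v, hv, rfl⟩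
      rcases List.mem_map.1 hx' with ⟨w, hw, hvw⟩
      rcases pv_pow_cancel p v w hp (hnd v hv) (hnd w hw) e f hvw.symm with ⟨he, -⟩
      omega
  refine ⟨?_, hmemL⟩
  have hle : (pvStage p n res).Pairwise (· ≤ ·) := by
    rw [hL]
    exact pvMergeAll_sorted _ (fun l hl => (hsrtL l hl).imp le_of_lt)
  have hnd' : (pvStage p n res).Nodup := by
    rw [hL, hperm.nodup_iff]
    exact hndF
  exact pv_lt_of_le_nodup _ hle hnd'

-- ===== VERDICT (by name: the statement is the Claim_ definition above) =====
theorem pv_alt_eq (n : Int) (hn : ¬ n ≤ 0) :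
    regular_numbers_alt n = pvStage 5 n (pvStage 3 n (pvStage 2 n [1])) := by
  simp only [regular_numbers_alt, if_neg hn, List.foldl_cons, List.foldl_nil, pvStage]

theorem regular_numbers_spec : Claim_equal_regular_numbers := by
  intro n _
  unfold Spec_regular_numbers
  by_cases hn : n ≤ 0
  · have hr : PySem.List.pyRange 0 n 1 = [] := PySem.List.pyRange_one_eq_nil (by omega)
    simp only [regular_numbers, regular_numbers_alt, hr, if_pos hn, List.map_nil,
      List.foldl_nil]
    exact (PySem.List.sorted_eq_nil_iff _ _ _).mpr rfl
  · -- B's three prime passes, characterized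
    have hb2 := pv_prime_step 2 (by norm_num) n hn [1]
      (by intro x hx; rw [List.mem_singleton] at hx; subst hx; norm_num)
      (List.pairwise_singleton _ _)
    have hmem1 : ∀ x, x ∈ pvStage 2 n [1] ↔ ∃ i < n.toNat, x = 2 ^ i := by
      intro x; rw [hb2.2]; simp
    have hnd3 : ∀ x ∈ pvStage 2 n [1], ¬ (3:Int) ∣ x := by
      intro x hx h
      rcases (hmem1 x).1 hx with ⟨i, -, rfl⟩
      have := Int.prime_three.dvd_of_dvd_pow h
      norm_num at this
    have hb3 := pv_prime_step 3 (by norm_num) n hn _ hnd3 hb2.1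
    have hmem2 : ∀ x, x ∈ pvStage 3 n (pvStage 2 n [1]) ↔
        ∃ i < n.toNat, ∃ j < n.toNat, x = 2 ^ i * 3 ^ j := by
      intro x; rw [hb3.2]
      constructor
      · rintro ⟨j, hj, v, hv, rfl⟩
        rcases (hmem1 v).1 hv with ⟨i, hi, rfl⟩
        exact ⟨i, hi, j, hj, rfl⟩
      · rintro ⟨i, hi, j, hj, rfl⟩
        exact ⟨j, hj, 2 ^ i, (hmem1 _).2 ⟨i, hi, rfl⟩, rfl⟩
    have hp5 : Prime (5:Int) := by norm_num
    have hnd5 : ∀ x ∈ pvStage 3 n (pvStage 2 n [1]), ¬ (5:Int) ∣ x := by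
      intro x hx h
      rcases (hmem2 x).1 hx with ⟨i, -, j, -, rfl⟩
      rcases (hp5.dvd_mul).1 h with h | h
      · have := hp5.dvd_of_dvd_pow h; norm_num at this
      · have := hp5.dvd_of_dvd_pow h; norm_num at this
    have hb5 := pv_prime_step 5 (by norm_num) n hn _ hnd5 hb3.1
    have hmem3 : ∀ x, x ∈ pvStage 5 n (pvStage 3 n (pvStage 2 n [1])) ↔
        ∃ i < n.toNat, ∃ j < n.toNat, ∃ k < n.toNat, x = 2 ^ i * 3 ^ j * 5 ^ k := by
      intro x; rw [hb5.2]
      constructor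
      · rintro ⟨k, hk, v, hv, rfl⟩
        rcases (hmem2 v).1 hv with ⟨i, hi, j, hj, rfl⟩
        exact ⟨i, hi, j, hj, k, hk, rfl⟩
      · rintro ⟨i, hi, j, hj, k, hk, rfl⟩
        exact ⟨k, hk, 2 ^ i * 3 ^ j, (hmem2 _).2 ⟨i, hi, j, hj, rfl⟩, rfl⟩
    -- A's set of products, characterized
    have hmemT : ∀ (c : Int) (x : Int),
        x ∈ (PySem.List.pyRange 0 n 1).map (fun i => c ^ i.toNat) ↔
        ∃ a < n.toNat, x = c ^ a := by
      intro c x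
      rw [PySem.List.pyRange_one]
      simp only [List.map_map, List.mem_map, List.mem_range, Function.comp_apply]
      constructor
      · rintro ⟨a, ha, rfl⟩
        exact ⟨a, by omega, by norm_num⟩
      · rintro ⟨a, ha, rfl⟩
        exact ⟨a, by omega, by norm_num⟩
    have hmemS : ∀ x, x ∈ (((PySem.List.pyRange 0 n 1).map (fun i => (2:Int) ^ i.toNat)).foldl
        (fun s i => ((PySem.List.pyRange 0 n 1).map (fun i => (3:Int) ^ i.toNat)).foldl
          (fun s j => ((PySem.List.pyRange 0 n 1).map (fun i => (5:Int) ^ i.toNat)).foldl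
            (fun s k => PySem.Set.add s (i * j * k)) s) s) PySem.Set.empty) ↔
        ∃ i < n.toNat, ∃ j < n.toNat, ∃ k < n.toNat, x = 2 ^ i * 3 ^ j * 5 ^ k := by
      intro x
      rw [pv_mem_foldl
          (fun i x => ∃ j ∈ (PySem.List.pyRange 0 n 1).map (fun i => (3:Int) ^ i.toNat),
            ∃ k ∈ (PySem.List.pyRange 0 n 1).map (fun i => (5:Int) ^ i.toNat), x = i * j * k) _
          (fun s i x => pv_mem_foldl
            (fun j x => ∃ k ∈ (PySem.List.pyRange 0 n 1).map (fun i => (5:Int) ^ i.toNat),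
              x = i * j * k) _
            (fun s j x => pv_mem_foldl (fun k x => x = i * j * k) _
              (fun s k x => by simp [PySem.Set.mem_add]) _ s x) _ s x)]
      constructor
      · rintro (h | ⟨i, hi, j, hj, k, hk, rfl⟩)
        · exact absurd h (by simp [PySem.Set.empty])
        · rcases (hmemT 2 i).1 hi with ⟨a, ha, rfl⟩
          rcases (hmemT 3 j).1 hj with ⟨b, hb, rfl⟩
          rcases (hmemT 5 k).1 hk with ⟨c, hc, rfl⟩
          exact ⟨a, ha, b, hb, c, hc, rfl⟩
      · rintro ⟨a, ha, b, hb, c, hc, rfl⟩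
        exact Or.inr ⟨2 ^ a, (hmemT 2 _).2 ⟨a, ha, rfl⟩, 3 ^ b, (hmemT 3 _).2 ⟨b, hb, rfl⟩,
          5 ^ c, (hmemT 5 _).2 ⟨c, hc, rfl⟩, rfl⟩
    have hndS : (((PySem.List.pyRange 0 n 1).map (fun i => (2:Int) ^ i.toNat)).foldl
        (fun s i => ((PySem.List.pyRange 0 n 1).map (fun i => (3:Int) ^ i.toNat)).foldl
          (fun s j => ((PySem.List.pyRange 0 n 1).map (fun i => (5:Int) ^ i.toNat)).foldl
            (fun s k => PySem.Set.add s (i * j * k)) s) s) PySem.Set.empty).Nodup := by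
      refine pv_nodup_foldl _ (fun s i hs => pv_nodup_foldl _ (fun s j hs => pv_nodup_foldl _
        (fun s k hs => PySem.Set.nodup_add _ _ hs) _ s hs) _ s hs) _ _ ?_
      simp [PySem.Set.empty]
    -- conclude: A's sorted set equals B's strictly sorted list
    rw [pv_alt_eq n hn]
    show PySem.List.sorted _ (fun x => x) false = _
    apply PySem.List.sorted_eq_of_perm_of_pairwise_lt
    · refine (List.perm_ext_iff_of_nodup (hb5.1.imp ne_of_lt) hndS).2 ?_
      intro x
      rw [hmem3, hmemS]
    · exact hb5.1
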